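-- pv_equiv track=rewrite | github.com/juess123/svg-text-structure-detection | core/svg_path_ops.py | command_stats
-- ===== SOURCE A (Python) =====
-- def command_stats(commands):
--     """
--     统计命令信息，供特征提取使用
--     """
--     stats = {
--         "num_commands": 0,
--         "num_subpaths": 0,
--         "num_curve_commands": 0,
--         "num_line_commands": 0,
--         "num_close_commands": 0,
--         "num_move_commands": 0,
--     }
--
--     if not commands:
--         return stats
--
--     curve_cmds = {"C", "c", "Q", "q"}
--     line_cmds = {"L", "l", "H", "h", "V", "v"}
--
--     for cmd, _ in commands:
--         stats["num_commands"] += 1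
--
--         if cmd in ("M", "m"):
--             stats["num_subpaths"] += 1
--             stats["num_move_commands"] += 1
--         elif cmd in curve_cmds:
--             stats["num_curve_commands"] += 1
--         elif cmd in line_cmds:
--             stats["num_line_commands"] += 1
--         elif cmd in ("Z", "z"):
--             stats["num_close_commands"] += 1
--
--     return stats
-- ===== SOURCE B (Python) =====
-- from collections import Counter
--
-- def command_stats(commands):
--     counter = Counter(cmd for cmd, _ in commands)
--     moves = counter["M"] + counter["m"]
--     return {
--         "num_commands": sum(counter.values()),
--         "num_subpaths": moves,
--         "num_curve_commands": sum(counter[k] for k in ("C", "c", "Q", "q")),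
--         "num_line_commands": sum(counter[k] for k in ("L", "l", "H", "h", "V", "v")),
--         "num_close_commands": counter["Z"] + counter["z"],
--         "num_move_commands": moves,
--     }
-- ===== Notes on version B (the rewrite author's own statement) =====
-- stated objective: simpler
-- what changed: Replaces the per-command if/elif branching loop (and the empty-list early return) with a Counter built once from the command letters, from which all six statistics are derived by summing table entries.
import Mathlib
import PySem

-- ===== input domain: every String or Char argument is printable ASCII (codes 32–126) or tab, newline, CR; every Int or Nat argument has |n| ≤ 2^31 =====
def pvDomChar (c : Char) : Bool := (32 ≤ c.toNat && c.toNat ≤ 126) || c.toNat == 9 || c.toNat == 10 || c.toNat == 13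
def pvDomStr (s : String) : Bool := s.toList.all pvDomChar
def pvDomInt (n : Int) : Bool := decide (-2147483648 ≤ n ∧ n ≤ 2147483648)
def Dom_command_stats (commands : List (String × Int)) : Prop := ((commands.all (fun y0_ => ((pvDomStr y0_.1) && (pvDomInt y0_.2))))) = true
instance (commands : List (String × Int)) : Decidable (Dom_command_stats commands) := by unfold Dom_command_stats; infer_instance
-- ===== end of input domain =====

-- B replaces A's per-command if/elif branching loop (and its empty-list early return) with a
-- Counter of the command letters built once, deriving all six statistics from that table (objective: simpler).

-- ===== PORT A =====
-- the initial stats dict, in Python's insertion order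
def statsInit : PySem.Dict String Int :=
  PySem.Dict.ofList
    [("num_commands", 0), ("num_subpaths", 0), ("num_curve_commands", 0),
     ("num_line_commands", 0), ("num_close_commands", 0), ("num_move_commands", 0)]

def curveCmds : List String := PySem.Set.ofList ["C", "c", "Q", "q"]
def lineCmds : List String := PySem.Set.ofList ["L", "l", "H", "h", "V", "v"]

-- the body of A's for-loop, one command at a time
def stepA (stats : PySem.Dict String Int) (p : String × Int) : PySem.Dict String Int :=
  let cmd := p.1
  let stats := stats.modify "num_commands" 0 (· + 1)
  if cmd = "M" ∨ cmd = "m" then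
    (stats.modify "num_subpaths" 0 (· + 1)).modify "num_move_commands" 0 (· + 1)
  else if cmd ∈ curveCmds then
    stats.modify "num_curve_commands" 0 (· + 1)
  else if cmd ∈ lineCmds then
    stats.modify "num_line_commands" 0 (· + 1)
  else if cmd = "Z" ∨ cmd = "z" then
    stats.modify "num_close_commands" 0 (· + 1)
  else
    stats

def command_stats (commands : List (String × Int)) : List (String × Int) :=
  if commands = [] then
    statsInit.items
  else
    (commands.foldl stepA statsInit).items

-- ===== PORT B =====
def command_stats_alt (commands : List (String × Int)) : List (String × Int) :=
  let counter := PySem.Dict.counter (commands.map Prod.fst)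
  let moves := counter.getD "M" 0 + counter.getD "m" 0
  [("num_commands", counter.values.sum),
   ("num_subpaths", moves),
   ("num_curve_commands", ((["C", "c", "Q", "q"] : List String).map (fun k => counter.getD k 0)).sum),
   ("num_line_commands", ((["L", "l", "H", "h", "V", "v"] : List String).map (fun k => counter.getD k 0)).sum),
   ("num_close_commands", counter.getD "Z" 0 + counter.getD "z" 0),
   ("num_move_commands", moves)]

-- ===== PRECONDITION & SPEC =====
def Spec_command_stats (commands : List (String × Int)) (out : List (String × Int)) : Prop := out = command_stats_alt commands
instance (commands : List (String × Int)) (out : List (String × Int)) : Decidable (Spec_command_stats commands out) := by unfold Spec_command_stats; infer_instance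

-- ===== CLAIM (what is proved, stated in full; the proofs are below) =====
def Claim_equal_command_stats : Prop := ∀ (commands : List (String × Int)), Dom_command_stats commands → Spec_command_stats commands (command_stats commands)

-- ===== LEMMAS AND PROOFS =====

def statsKeys : List String :=
  ["num_commands", "num_subpaths", "num_curve_commands",
   "num_line_commands", "num_close_commands", "num_move_commands"]

-- one step of A's loop keeps the six keys and bumps exactly the counters its branch names
lemma keys_stepA (d : PySem.Dict String Int) (p : String × Int) (hk : d.keys = statsKeys) :
    (stepA d p).keys = statsKeys := by
  unfold stepA
  have hc : ∀ (e : PySem.Dict String Int), e.keys = statsKeys → ∀ k, k ∈ statsKeys → e.contains k = true := by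
    intro e he k hkm; rw [PySem.Dict.contains_iff_mem_keys, he]; exact hkm
  have hm : ∀ (e : PySem.Dict String Int), e.keys = statsKeys → ∀ k, k ∈ statsKeys →
      (e.modify k 0 (· + 1)).keys = statsKeys := by
    intro e he k hkm
    rw [PySem.Dict.keys_modify, PySem.Dict.keys_insert_of_contains _ _ (hc e he k hkm)]
    exact he
  dsimp only
  split_ifs <;>
    first
      | exact hm _ (hm _ (hm _ hk "num_commands" (by decide)) "num_subpaths" (by decide)) "num_move_commands" (by decide)
      | exact hm _ (hm _ hk "num_commands" (by decide)) "num_curve_commands" (by decide)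
      | exact hm _ (hm _ hk "num_commands" (by decide)) "num_line_commands" (by decide)
      | exact hm _ (hm _ hk "num_commands" (by decide)) "num_close_commands" (by decide)
      | exact hm _ hk "num_commands" (by decide)

-- A's fold, started from any dict carrying the six keys, adds per-letter counts to each entry
lemma foldA_spec (cs : List (String × Int)) (d : PySem.Dict String Int) (hk : d.keys = statsKeys) :
    (cs.foldl stepA d).keys = statsKeys ∧
    (cs.foldl stepA d).getD "num_commands" 0 = d.getD "num_commands" 0 + (cs.length : Int) ∧
    (cs.foldl stepA d).getD "num_subpaths" 0 = d.getD "num_subpaths" 0 + (((cs.map Prod.fst).count "M" + (cs.map Prod.fst).count "m" : Nat) : Int) ∧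
    (cs.foldl stepA d).getD "num_curve_commands" 0 = d.getD "num_curve_commands" 0 + (((cs.map Prod.fst).count "C" + (cs.map Prod.fst).count "c" + (cs.map Prod.fst).count "Q" + (cs.map Prod.fst).count "q" : Nat) : Int) ∧
    (cs.foldl stepA d).getD "num_line_commands" 0 = d.getD "num_line_commands" 0 + (((cs.map Prod.fst).count "L" + (cs.map Prod.fst).count "l" + (cs.map Prod.fst).count "H" + (cs.map Prod.fst).count "h" + (cs.map Prod.fst).count "V" + (cs.map Prod.fst).count "v" : Nat) : Int) ∧
    (cs.foldl stepA d).getD "num_close_commands" 0 = d.getD "num_close_commands" 0 + (((cs.map Prod.fst).count "Z" + (cs.map Prod.fst).count "z" : Nat) : Int) ∧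
    (cs.foldl stepA d).getD "num_move_commands" 0 = d.getD "num_move_commands" 0 + (((cs.map Prod.fst).count "M" + (cs.map Prod.fst).count "m" : Nat) : Int) := by
  induction cs generalizing d with
  | nil => simpa using hk
  | cons p rest ih =>
    obtain ⟨c, v⟩ := p
    have hcur : curveCmds = ["C", "c", "Q", "q"] := by decide
    have hlin : lineCmds = ["L", "l", "H", "h", "V", "v"] := by decide
    have hk' := keys_stepA d (c, v) hk
    obtain ⟨K, H1, H2, H3, H4, H5, H6⟩ := ih (stepA d (c, v)) hk'
    simp only [List.foldl_cons]
    by_cases hM : c = "M" ∨ c = "m"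
    · have hs : stepA d (c, v) = ((d.modify "num_commands" 0 (· + 1)).modify "num_subpaths" 0 (· + 1)).modify "num_move_commands" 0 (· + 1) := by
        simp [stepA, hM]
      rcases hM with h | h <;> subst h <;>
        simp only [hs] at H1 H2 H3 H4 H5 H6 <;>
        refine ⟨K, ?_, ?_, ?_, ?_, ?_, ?_⟩ <;>
          simp only [H1, H2, H3, H4, H5, H6, hs, PySem.Dict.getD_modify, List.map_cons, List.count_cons] <;>
          simp <;> omega
    · by_cases hC : c ∈ curveCmds
      · have hs : stepA d (c, v) = (d.modify "num_commands" 0 (· + 1)).modify "num_curve_commands" 0 (· + 1) := by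
          simp [stepA, hM, hC]
        rw [hcur] at hC
        simp only [List.mem_cons, List.not_mem_nil, or_false] at hC
        rcases hC with h | h | h | h <;> subst h <;>
          simp only [hs] at H1 H2 H3 H4 H5 H6 <;>
          refine ⟨K, ?_, ?_, ?_, ?_, ?_, ?_⟩ <;>
            simp only [H1, H2, H3, H4, H5, H6, hs, PySem.Dict.getD_modify, List.map_cons, List.count_cons] <;>
            simp <;> omega
      · by_cases hL : c ∈ lineCmds
        · have hs : stepA d (c, v) = (d.modify "num_commands" 0 (· + 1)).modify "num_line_commands" 0 (· + 1) := by
            simp [stepA, hM, hC, hL]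
          rw [hlin] at hL
          simp only [List.mem_cons, List.not_mem_nil, or_false] at hL
          rcases hL with h | h | h | h | h | h <;> subst h <;>
            simp only [hs] at H1 H2 H3 H4 H5 H6 <;>
            refine ⟨K, ?_, ?_, ?_, ?_, ?_, ?_⟩ <;>
              simp only [H1, H2, H3, H4, H5, H6, hs, PySem.Dict.getD_modify, List.map_cons, List.count_cons] <;>
              simp <;> omega
        · by_cases hZ : c = "Z" ∨ c = "z"
          · have hs : stepA d (c, v) = (d.modify "num_commands" 0 (· + 1)).modify "num_close_commands" 0 (· + 1) := by
              simp [stepA, hM, hC, hL, hZ]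
            rw [hcur] at hC; rw [hlin] at hL
            simp only [List.mem_cons, List.not_mem_nil, or_false, not_or] at hC hL
            rcases hZ with h | h <;> subst h <;>
              simp only [hs] at H1 H2 H3 H4 H5 H6 <;>
              refine ⟨K, ?_, ?_, ?_, ?_, ?_, ?_⟩ <;>
                simp only [H1, H2, H3, H4, H5, H6, hs, PySem.Dict.getD_modify, List.map_cons, List.count_cons] <;>
                simp <;> omega
          · have hs : stepA d (c, v) = d.modify "num_commands" 0 (· + 1) := by
              simp [stepA, hM, hC, hL, hZ]
            rw [hcur] at hC; rw [hlin] at hL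
            simp only [List.mem_cons, List.not_mem_nil, or_false, not_or] at hC hL
            push Not at hM hZ
            simp only [hs] at H1 H2 H3 H4 H5 H6
            refine ⟨K, ?_, ?_, ?_, ?_, ?_, ?_⟩ <;>
            · simp only [H1, H2, H3, H4, H5, H6, hs, PySem.Dict.getD_modify, List.map_cons, List.count_cons]
              simp [hM.1, hM.2, hZ.1, hZ.2, hC.1, hC.2.1, hC.2.2.1, hC.2.2.2, hL.1, hL.2.1, hL.2.2.1, hL.2.2.2.1, hL.2.2.2.2.1, hL.2.2.2.2.2]
              try omega

lemma values_counter_sum (l : List String) :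
    (PySem.Dict.counter l).values.sum = (l.length : Int) := by
  have hperm : (PySem.Set.ofList l).Perm l.dedup := by
    rw [List.perm_ext_iff_of_nodup (PySem.Set.nodup_ofList l) l.nodup_dedup]
    intro a; rw [PySem.Set.mem_ofList, List.mem_dedup]
  have hv : (PySem.Dict.counter l).values = (PySem.Set.ofList l).map (fun k => (l.count k : Int)) := by
    show ((PySem.Dict.counter l).items).map Prod.snd = _
    rw [PySem.Dict.items_counter, List.map_map]; rfl
  rw [hv, List.Perm.sum_eq (hperm.map _)]
  have : (List.map (fun k => (l.count k : Int)) l.dedup)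
      = List.map (fun n : Nat => (n : Int)) (List.map (fun k => l.count k) l.dedup) := by
    simp [List.map_map, Function.comp]
  rw [this, ← Nat.cast_list_sum, List.sum_map_count_dedup_eq_length]

-- ===== VERDICT (by name: the statement is the Claim_ definition above) =====
theorem command_stats_spec : Claim_equal_command_stats := by
  intro commands _
  unfold Spec_command_stats command_stats command_stats_alt
  have hk0 : statsInit.keys = statsKeys := by decide
  rcases eq_or_ne commands [] with h | h
  · subst h; decide
  · simp only [if_neg h]
    obtain ⟨hk, h1, h2, h3, h4, h5, h6⟩ := foldA_spec commands statsInit hk0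
    have hnd : statsKeys.Nodup := by decide
    rw [PySem.Dict.items_eq_map_keys _ (hk ▸ hnd) 0, hk]
    have hz : ∀ k, k ∈ statsKeys → statsInit.getD k 0 = 0 := by decide
    simp only [statsKeys, List.map_cons, List.map_nil]
    rw [h1, h2, h3, h4, h5, h6]
    simp only [hz _ (by decide : "num_commands" ∈ statsKeys),
      hz _ (by decide : "num_subpaths" ∈ statsKeys),
      hz _ (by decide : "num_curve_commands" ∈ statsKeys),
      hz _ (by decide : "num_line_commands" ∈ statsKeys),
      hz _ (by decide : "num_close_commands" ∈ statsKeys),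
      hz _ (by decide : "num_move_commands" ∈ statsKeys)]
    rw [values_counter_sum]
    simp [PySem.Dict.getD_counter, List.length_map]
    omega
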